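-- pv_equiv track=rewrite | github.com/Techylem/hbl-bank-statement-txt-csv | Python Code/algorithm.py | join_cells
-- ===== SOURCE A (Python) =====
-- def join_cells(input_str):
--     str3 = []
--     # Start: Code for generating a final string with joined cells
--     concatenated_str = ""
--     for i, temp in reversed(list(enumerate(input_str))):
--         if ',' in temp:
--             my_list = list(temp.split(','))
--             if len(my_list[6]) > 1:
--                 my_list[3] += concatenated_str
--                 temp_str = ""
--                 for string in my_list:
--                     temp_str += string + ','
--                 str3.insert(0, temp_str)
--                 concatenated_str = ""
--             else:
--                 concatenated_str = my_list[3] + ' ' + concatenated_str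
--         else:
--             str3.insert(0, temp)
--     # End: Code for generating a final string with joined cells
--     return str3
-- ===== SOURCE B (Python) =====
-- def join_cells(input_str):
--     done = []          # fully finished output rows
--     pending = None     # field list of the most recent real row, still absorbing continuations
--     tail = []          # comma-less rows seen after the pending row
--     for row in input_str:
--         if ',' not in row:
--             (tail if pending is not None else done).append(row)
--         else:
--             fields = row.split(',')
--             if len(fields[6]) > 1:
--                 if pending is not None:
--                     done.append(','.join(pending) + ',')
--                     done.extend(tail)
--                     tail = []
--                 pending = fields
--             elif pending is not None:
--                 pending[3] += fields[3] + ' '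
--     if pending is not None:
--         done.append(','.join(pending) + ',')
--         done.extend(tail)
--     return done
-- ===== Notes on version B (the rewrite author's own statement) =====
-- stated objective: faster
-- what changed: Replaces A's reverse traversal with str3.insert(0,...) and a string accumulator by a forward single pass that keeps the field list of the last emitted real row as a mutable target (plus a tail of comma-less rows) and appends continuations directly into its field 3, appending to the output list instead of inserting at the front.
import Mathlib
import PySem

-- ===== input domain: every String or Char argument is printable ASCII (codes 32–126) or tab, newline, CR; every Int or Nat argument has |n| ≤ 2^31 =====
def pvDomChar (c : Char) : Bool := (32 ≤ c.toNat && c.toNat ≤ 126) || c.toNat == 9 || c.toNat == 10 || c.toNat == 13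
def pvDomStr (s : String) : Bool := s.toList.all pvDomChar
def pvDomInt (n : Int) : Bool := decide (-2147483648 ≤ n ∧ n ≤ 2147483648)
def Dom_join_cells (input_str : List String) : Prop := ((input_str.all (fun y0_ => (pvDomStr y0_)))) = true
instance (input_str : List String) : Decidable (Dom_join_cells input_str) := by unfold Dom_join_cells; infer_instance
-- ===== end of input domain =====

-- B replaces A's reverse traversal + insert(0) + string accumulator by a forward single pass
-- that keeps the last emitted real row's field list as the mutation target (objective: faster).

-- s.split(',') — the separator is the non-empty literal ",", so split? is always `some` (exact)
def pvSplit (s : String) : List String := (PySem.Str.split? s ",").getD []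

-- ===== PORT A =====
-- one iteration of A's `for i, temp in reversed(list(enumerate(input_str)))` loop
-- (the index i is unused by A's body); state = (str3, concatenated_str); insert(0, x) = cons
def pvStepA (temp : String) (st : List String × String) : List String × String :=
  if PySem.Str.isIn "," temp then
    let my_list := pvSplit temp
    if 1 < PySem.Str.len (PySem.List.pyGetD my_list 6 "") then
      let my_list' := my_list.set 3 (PySem.List.pyGetD my_list 3 "" ++ st.2)
      let temp_str := my_list'.foldl (fun a s => a ++ s ++ ",") ""
      (temp_str :: st.1, "")
    else
      (st.1, PySem.List.pyGetD my_list 3 "" ++ " " ++ st.2)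
  else (temp :: st.1, st.2)

def join_cells (input_str : List String) : List String :=
  (input_str.foldr pvStepA ([], "")).1

-- ===== PORT B =====
-- one iteration of B's forward loop; state = (done, pending, tail)
def pvStepB (st : List String × Option (List String) × List String) (row : String) :
    List String × Option (List String) × List String :=
  let done := st.1
  let pending := st.2.1
  let tail := st.2.2
  if !(PySem.Str.isIn "," row) then
    match pending with
    | some _ => (done, pending, tail ++ [row])
    | none   => (done ++ [row], pending, tail)
  else
    let fields := pvSplit row
    if 1 < PySem.Str.len (PySem.List.pyGetD fields 6 "") then
      match pending with
      | some p => (done ++ [PySem.Str.join "," p ++ ","] ++ tail, some fields, [])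
      | none   => (done, some fields, [])
    else
      match pending with
      | some p => (done, some (p.set 3 (PySem.List.pyGetD p 3 "" ++ (PySem.List.pyGetD fields 3 "" ++ " "))), tail)
      | none   => st

def join_cells_alt (input_str : List String) : List String :=
  match input_str.foldl pvStepB ([], none, []) with
  | (done, some p, tail) => done ++ [PySem.Str.join "," p ++ ","] ++ tail
  | (done, none, _tail)  => done

-- ===== PRECONDITION & SPEC =====
-- Pre_ excludes exactly the inputs on which A raises IndexError: a row containing ','
-- whose comma-split has fewer than 7 fields (my_list[6] is read on every comma row).
def Pre_join_cells (input_str : List String) : Prop :=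
  ∀ s ∈ input_str, PySem.Str.isIn "," s = true → 7 ≤ (pvSplit s).length
instance (input_str : List String) : Decidable (Pre_join_cells input_str) := by
  unfold Pre_join_cells; infer_instance

def pvWitness_join_cells : List String :=
  ["2020,ref1,x,desc,y,z,100,", "cont,a,b,more,c,d,7", "plain line", "2021,ref2,x,desc2,y,z,200,"]

def Spec_join_cells (input_str : List String) (out : List String) : Prop := out = join_cells_alt input_str
instance (input_str : List String) (out : List String) : Decidable (Spec_join_cells input_str out) := by unfold Spec_join_cells; infer_instance

-- ===== CLAIM (what is proved, stated in full; the proofs are below) =====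
def Claim_equal_join_cells : Prop := ∀ (input_str : List String), Dom_join_cells input_str → Pre_join_cells input_str → Spec_join_cells input_str (join_cells input_str)

-- ===== LEMMAS AND PROOFS =====

-- B's final flush (identical to the match in join_cells_alt)
def pvFin (st : List String × Option (List String) × List String) : List String :=
  match st with
  | (done, some p, tail) => done ++ [PySem.Str.join "," p ++ ","] ++ tail
  | (done, none, _tail)  => done

-- the string B keeps virtually: pending row with `c` already appended into field 3, rendered
def pvRender (p : List String) (c : String) : String :=
  PySem.Str.join "," (p.set 3 (PySem.List.pyGetD p 3 "" ++ c)) ++ ","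

lemma join_comma_cons (f g : String) (fs : List String) :
    PySem.Str.join "," (f :: g :: fs) = f ++ "," ++ PySem.Str.join "," (g :: fs) := by
  apply String.toList_inj.mp
  simp [PySem.Str.join, PySem.Chars.join_cons_cons]

lemma foldl_commajoin : ∀ (fs : List String) (f init : String),
    List.foldl (fun a s => a ++ s ++ ",") init (f :: fs) = init ++ PySem.Str.join "," (f :: fs) ++ "," := by
  intro fs
  induction fs with
  | nil => intro f init; simp [PySem.Str.join, String.append_assoc]
  | cons g fs ih =>
      intro f init
      show List.foldl (fun a s => a ++ s ++ ",") (init ++ f ++ ",") (g :: fs) = _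
      rw [ih g (init ++ f ++ ","), join_comma_cons]
      simp [String.append_assoc]

lemma pyGetD_set_self (p : List String) (v : String) (h : 4 ≤ p.length) :
    PySem.List.pyGetD (p.set 3 v) 3 "" = v := by
  rw [PySem.List.pyGetD_ofNat']
  rw [List.getD_eq_getElem _ "" (by simpa using (by omega : 3 < p.length))]
  exact List.getElem_set_self _

lemma pvRender_empty (p : List String) (h : 4 ≤ p.length) :
    pvRender p "" = PySem.Str.join "," p ++ "," := by
  unfold pvRender
  rw [PySem.List.pyGetD_ofNat', List.getD_eq_getElem p "" (show 3 < p.length by omega),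
      String.append_empty, List.set_getElem_self]

lemma pvRender_absorb (p : List String) (m c : String) (h : 4 ≤ p.length) :
    pvRender (p.set 3 (PySem.List.pyGetD p 3 "" ++ (m ++ " "))) c = pvRender p (m ++ " " ++ c) := by
  unfold pvRender
  rw [pyGetD_set_self p _ h, List.set_set]
  simp [String.append_assoc]

lemma pvRender_eq_foldl (fs : List String) (hne : fs ≠ []) (c : String) :
    pvRender fs c = (fs.set 3 (PySem.List.pyGetD fs 3 "" ++ c)).foldl (fun a s => a ++ s ++ ",") "" := by
  match fs, hne with
  | f :: fs, _ =>
      unfold pvRender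
      cases h3 : (f :: fs).set 3 (PySem.List.pyGetD (f :: fs) 3 "" ++ c) with
      | nil => exact absurd (congrArg List.length h3) (by simp)
      | cons g gs =>
          rw [foldl_commajoin gs g ""]
          simp

lemma runB_spec : ∀ (l : List String), Pre_join_cells l →
    (∀ done, pvFin (l.foldl pvStepB (done, none, [])) = done ++ (l.foldr pvStepA ([], "")).1) ∧
    (∀ done p tail, 4 ≤ p.length →
      pvFin (l.foldl pvStepB (done, some p, tail)) =
        done ++ pvRender p (l.foldr pvStepA ([], "")).2 :: (tail ++ (l.foldr pvStepA ([], "")).1)) := by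
  intro l
  induction l with
  | nil =>
      intro _
      refine ⟨fun done => by simp [pvFin], fun done p tail hp => ?_⟩
      simp [pvFin, pvRender_empty p hp]
  | cons x l ih =>
      intro pre
      have prel : Pre_join_cells l := fun s hs => pre s (List.mem_cons_of_mem _ hs)
      obtain ⟨ih1, ih2⟩ := ih prel
      by_cases hin : PySem.Str.isIn "," x = true
      · have hin' : PySem.Chars.isIn [','] x.toList = true := by simpa using hin
        have hlen : 7 ≤ (pvSplit x).length := pre x (List.mem_cons_self) hin
        by_cases hreal : 1 < PySem.Str.len (PySem.List.pyGetD (pvSplit x) 6 "")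
        · -- real row
          have hreal' : 1 < (PySem.List.pyGetD (pvSplit x) 6 "").length := by
            rw [PySem.Str.len_eq] at hreal; exact_mod_cast hreal
          have hflen : 4 ≤ (pvSplit x).length := by omega
          constructor
          · intro done
            rw [List.foldl_cons, show pvStepB (done, none, []) x = (done, some (pvSplit x), []) by
                  simp [pvStepB, hin', hreal']]
            rw [ih2 done (pvSplit x) [] hflen]
            rw [show (List.foldr pvStepA ([], "") (x :: l)).1 =
                  ((pvSplit x).set 3 (PySem.List.pyGetD (pvSplit x) 3 "" ++
                    (List.foldr pvStepA ([], "") l).2)).foldl (fun a s => a ++ s ++ ",") "" ::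
                  (List.foldr pvStepA ([], "") l).1 by
                  simp [List.foldr_cons, pvStepA, hin', hreal']]
            rw [pvRender_eq_foldl _ (by intro h; rw [h] at hlen; simp at hlen) _]
            simp
          · intro done p tail hp
            rw [List.foldl_cons, show pvStepB (done, some p, tail) x =
                  (done ++ [PySem.Str.join "," p ++ ","] ++ tail, some (pvSplit x), []) by
                  simp [pvStepB, hin', hreal']]
            rw [ih2 _ (pvSplit x) [] hflen]
            rw [show (List.foldr pvStepA ([], "") (x :: l)).2 = "" by
                  simp [List.foldr_cons, pvStepA, hin', hreal']]
            rw [show (List.foldr pvStepA ([], "") (x :: l)).1 =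
                  ((pvSplit x).set 3 (PySem.List.pyGetD (pvSplit x) 3 "" ++
                    (List.foldr pvStepA ([], "") l).2)).foldl (fun a s => a ++ s ++ ",") "" ::
                  (List.foldr pvStepA ([], "") l).1 by
                  simp [List.foldr_cons, pvStepA, hin', hreal']]
            rw [pvRender_empty p hp,
                pvRender_eq_foldl _ (by intro h; rw [h] at hlen; simp at hlen) _]
            simp
        · -- continuation row
          have hreal' : ¬ 1 < (PySem.List.pyGetD (pvSplit x) 6 "").length := by
            rw [PySem.Str.len_eq] at hreal; exact_mod_cast hreal
          constructor
          · intro done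
            rw [List.foldl_cons, show pvStepB (done, none, []) x = (done, none, []) by
                  simp [pvStepB, hin', hreal']]
            rw [ih1 done]
            rw [show (List.foldr pvStepA ([], "") (x :: l)).1 = (List.foldr pvStepA ([], "") l).1 by
                  simp [List.foldr_cons, pvStepA, hin', hreal']]
          · intro done p tail hp
            rw [List.foldl_cons, show pvStepB (done, some p, tail) x =
                  (done, some (p.set 3 (PySem.List.pyGetD p 3 "" ++
                    (PySem.List.pyGetD (pvSplit x) 3 "" ++ " "))), tail) by
                  simp [pvStepB, hin', hreal']]
            rw [ih2 done _ tail (by simp [hp])]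
            rw [show (List.foldr pvStepA ([], "") (x :: l)).2 =
                  PySem.List.pyGetD (pvSplit x) 3 "" ++ " " ++ (List.foldr pvStepA ([], "") l).2 by
                  simp [List.foldr_cons, pvStepA, hin', hreal']]
            rw [show (List.foldr pvStepA ([], "") (x :: l)).1 = (List.foldr pvStepA ([], "") l).1 by
                  simp [List.foldr_cons, pvStepA, hin', hreal']]
            rw [pvRender_absorb p _ _ hp]
      · -- comma-less row
        have hin' : PySem.Chars.isIn [','] x.toList = false := by simpa using hin
        constructor
        · intro done
          rw [List.foldl_cons, show pvStepB (done, none, []) x = (done ++ [x], none, []) by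
                simp [pvStepB, hin']]
          rw [ih1 (done ++ [x])]
          rw [show (List.foldr pvStepA ([], "") (x :: l)).1 = x :: (List.foldr pvStepA ([], "") l).1 by
                simp [List.foldr_cons, pvStepA, hin']]
          simp
        · intro done p tail hp
          rw [List.foldl_cons, show pvStepB (done, some p, tail) x = (done, some p, tail ++ [x]) by
                simp [pvStepB, hin']]
          rw [ih2 done p (tail ++ [x]) hp]
          rw [show (List.foldr pvStepA ([], "") (x :: l)).1 = x :: (List.foldr pvStepA ([], "") l).1 by
                simp [List.foldr_cons, pvStepA, hin']]
          rw [show (List.foldr pvStepA ([], "") (x :: l)).2 = (List.foldr pvStepA ([], "") l).2 by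
                simp [List.foldr_cons, pvStepA, hin']]
          simp

-- ===== VERDICT (by name: the statement is the Claim_ definition above) =====
theorem join_cells_spec : Claim_equal_join_cells := by
  intro input_str _dom pre
  unfold Spec_join_cells
  have h := (runB_spec input_str pre).1 []
  have e : join_cells_alt input_str = pvFin (input_str.foldl pvStepB ([], none, [])) := rfl
  rw [e, h]
  simp [join_cells]
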